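-- pv_equiv track=rewrite | github.com/AndresAp01/Taller_de_Programacion | Examenes_Intro/4_Luis_Acunna_Perez.py | TRES_AUX
-- ===== SOURCE A (Python) =====
-- def TRES_AUX(lista, indice):
--     if indice>=len(lista):
--         return []
--     else:
--         return [[
--             (-1)**indice*(indice+1), 0, (-1)**indice*(indice+1), #Patron
--             ((lista[indice]+ #Digito
--             lista[(indice+2)%len(lista)]- #Se salta 2
--             lista[(indice+4)%len(lista)])* #Se salta 4
--             (lista[indice]-1)+(lista[indice]*-1))**(indice+1), #Calcula antecesor,
--             (-1)**(indice+1)*(indice+1), 0, (-1)**(indice+1)*(indice+1) #Patron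
--         ]]+TRES_AUX(lista, indice+1)
-- ===== SOURCE B (Python) =====
-- def TRES_AUX(lista, indice):
--     result = []
--     n = len(lista)
--     for i in range(indice, n):
--         s1 = (-1) ** i
--         s2 = (-1) ** (i + 1)
--         x = lista[i]
--         base = (x + lista[(i + 2) % n] - lista[(i + 4) % n]) * (x - 1) - x
--         result.append([s1 * (i + 1), 0, s1 * (i + 1), base ** (i + 1),
--                        s2 * (i + 1), 0, s2 * (i + 1)])
--     return result
-- ===== Notes on version B (the rewrite author's own statement) =====
-- stated objective: alternative
-- what changed: Replaces the linear recursion (one recursive call and list concatenation per row) by a single iterative loop over range(indice, len(lista)) appending each row to an accumulator, with signs and the indexed element computed once per row.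
import Mathlib
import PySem

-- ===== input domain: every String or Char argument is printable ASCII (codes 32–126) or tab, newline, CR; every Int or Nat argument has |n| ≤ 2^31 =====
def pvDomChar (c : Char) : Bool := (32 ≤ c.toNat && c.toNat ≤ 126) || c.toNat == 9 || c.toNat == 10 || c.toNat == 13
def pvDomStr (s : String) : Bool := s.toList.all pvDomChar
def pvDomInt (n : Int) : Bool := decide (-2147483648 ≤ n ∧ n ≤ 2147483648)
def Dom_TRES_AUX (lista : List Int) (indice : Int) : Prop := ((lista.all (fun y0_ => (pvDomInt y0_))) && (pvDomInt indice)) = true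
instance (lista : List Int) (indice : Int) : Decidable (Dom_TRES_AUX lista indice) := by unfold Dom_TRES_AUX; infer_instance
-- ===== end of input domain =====

-- B replaces A's linear recursion by an iterative accumulator loop over range(indice, len(lista)),
-- computing each sign and element once per row; equivalence is proved for indice ≥ 0 (Pre_).

-- ===== PORT A =====
-- Literal transliteration of A's recursion. lista[j] is PySem.List.pyGetD lista j 0: inside
-- Pre_TRES_AUX every access is in range, so the default 0 is never used; (-1)**indice is
-- (-1)^indice.toNat, exact for indice ≥ 0 (Python yields floats for negative indice, excluded by Pre_).
def TRES_AUX (lista : List Int) (indice : Int) : List (List Int) :=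
  if h : indice ≥ (lista.length : Int) then []
  else
    [[ (-1 : Int) ^ indice.toNat * (indice + 1), 0, (-1 : Int) ^ indice.toNat * (indice + 1),
       ((PySem.List.pyGetD lista indice 0
         + PySem.List.pyGetD lista (PySem.Int.mod (indice + 2) (lista.length : Int)) 0
         - PySem.List.pyGetD lista (PySem.Int.mod (indice + 4) (lista.length : Int)) 0)
        * (PySem.List.pyGetD lista indice 0 - 1)
        + (PySem.List.pyGetD lista indice 0 * -1)) ^ (indice + 1).toNat,
       (-1 : Int) ^ (indice + 1).toNat * (indice + 1), 0,
       (-1 : Int) ^ (indice + 1).toNat * (indice + 1) ]]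
    ++ TRES_AUX lista (indice + 1)
termination_by ((lista.length : Int) - indice).toNat
decreasing_by omega

-- ===== PORT B =====
-- One row of B: sign and element computed once, subtraction instead of *(-1).
def pvRowB (lista : List Int) (i : Int) : List Int :=
  let n : Int := (lista.length : Int)
  let s1 : Int := (-1 : Int) ^ i.toNat
  let s2 : Int := (-1 : Int) ^ (i + 1).toNat
  let x := PySem.List.pyGetD lista i 0
  let base := (x + PySem.List.pyGetD lista (PySem.Int.mod (i + 2) n) 0
                 - PySem.List.pyGetD lista (PySem.Int.mod (i + 4) n) 0) * (x - 1) - x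
  [s1 * (i + 1), 0, s1 * (i + 1), base ^ (i + 1).toNat,
   s2 * (i + 1), 0, s2 * (i + 1)]

def TRES_AUX_alt (lista : List Int) (indice : Int) : List (List Int) :=
  (PySem.List.pyRange indice (lista.length : Int) 1).foldl
    (fun acc i => acc ++ [pvRowB lista i]) []

-- ===== PRECONDITION & SPEC =====
-- Pre_ excludes negative indice, where Python's (-1)**indice yields floats (not ints of the
-- declared type) or lista[indice] raises IndexError; A never raises for indice ≥ 0.
def Pre_TRES_AUX (lista : List Int) (indice : Int) : Prop := 0 ≤ indice
instance (lista : List Int) (indice : Int) : Decidable (Pre_TRES_AUX lista indice) := by unfold Pre_TRES_AUX; infer_instance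

def pvWitness_TRES_AUX : List Int × Int := ([1, 2, 3], 0)

def Spec_TRES_AUX (lista : List Int) (indice : Int) (out : List (List Int)) : Prop := out = TRES_AUX_alt lista indice
instance (lista : List Int) (indice : Int) (out : List (List Int)) : Decidable (Spec_TRES_AUX lista indice out) := by unfold Spec_TRES_AUX; infer_instance

-- ===== CLAIM (what is proved, stated in full; the proofs are below) =====
def Claim_equal_TRES_AUX : Prop := ∀ (lista : List Int) (indice : Int), Dom_TRES_AUX lista indice → Pre_TRES_AUX lista indice → Spec_TRES_AUX lista indice (TRES_AUX lista indice)

-- ===== LEMMAS AND PROOFS =====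

-- A's row equals B's row (the bases differ only by x * -1 = -x).
theorem pv_row_eq (lista : List Int) (i : Int) :
    [ (-1 : Int) ^ i.toNat * (i + 1), 0, (-1 : Int) ^ i.toNat * (i + 1),
      ((PySem.List.pyGetD lista i 0
        + PySem.List.pyGetD lista (PySem.Int.mod (i + 2) (lista.length : Int)) 0
        - PySem.List.pyGetD lista (PySem.Int.mod (i + 4) (lista.length : Int)) 0)
       * (PySem.List.pyGetD lista i 0 - 1)
       + (PySem.List.pyGetD lista i 0 * -1)) ^ (i + 1).toNat,
      (-1 : Int) ^ (i + 1).toNat * (i + 1), 0,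
      (-1 : Int) ^ (i + 1).toNat * (i + 1) ] = pvRowB lista i := by
  have hbase : (PySem.List.pyGetD lista i 0
        + PySem.List.pyGetD lista (PySem.Int.mod (i + 2) (lista.length : Int)) 0
        - PySem.List.pyGetD lista (PySem.Int.mod (i + 4) (lista.length : Int)) 0)
       * (PySem.List.pyGetD lista i 0 - 1)
       + (PySem.List.pyGetD lista i 0 * -1)
      = (PySem.List.pyGetD lista i 0
        + PySem.List.pyGetD lista (PySem.Int.mod (i + 2) (lista.length : Int)) 0
        - PySem.List.pyGetD lista (PySem.Int.mod (i + 4) (lista.length : Int)) 0)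
       * (PySem.List.pyGetD lista i 0 - 1) - PySem.List.pyGetD lista i 0 := by ring
  simp only [pvRowB, hbase]

-- A computed on the range form of B.
theorem pv_A_eq_map (k : Nat) (lista : List Int) (indice : Int) (h0 : 0 ≤ indice)
    (hk : ((lista.length : Int) - indice).toNat = k) :
    TRES_AUX lista indice =
      (PySem.List.pyRange indice (lista.length : Int) 1).map (pvRowB lista) := by
  induction k generalizing indice with
  | zero =>
    rw [TRES_AUX, dif_pos (by omega), PySem.List.pyRange_one_eq_nil (by omega), List.map_nil]
  | succ k ih =>
    have hlt : indice < (lista.length : Int) := by omega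
    rw [TRES_AUX, dif_neg (by omega), PySem.List.pyRange_one_cons hlt, List.map_cons,
      ih (indice + 1) (by omega) (by omega), pv_row_eq lista indice]
    rfl

theorem pv_alt_eq_map (lista : List Int) (indice : Int) :
    TRES_AUX_alt lista indice =
      (PySem.List.pyRange indice (lista.length : Int) 1).map (pvRowB lista) := by
  unfold TRES_AUX_alt
  simpa using PySem.List.foldl_append_singleton_eq_map (pvRowB lista) (PySem.List.pyRange indice (lista.length : Int) 1) []

-- ===== VERDICT (by name: the statement is the Claim_ definition above) =====
theorem TRES_AUX_spec : Claim_equal_TRES_AUX := by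
  intro lista indice _ hpre
  unfold Spec_TRES_AUX
  rw [pv_alt_eq_map, pv_A_eq_map ((lista.length : Int) - indice).toNat lista indice hpre rfl]
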